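-- pv_equiv track=rewrite | github.com/royadityak94/InterviewPrep | Grokking/Bitwise/bitwise_or.py | required_flips
-- ===== SOURCE A (Python) =====
-- def required_flips(a, b, c):
--     flips = 0
--     for i in range(32):
--         bitC = (c >> i) & 1
--         bitB = (b >> i) & 1
--         bitA = (a >> i) & 1
--
--         if (bitA | bitB) != bitC:
--             if bitA and bitB:
--                 flips += 2
--             else:
--                 # Cases: {bitC = 0}, {bitA and bitB = 0}
--                 flips += 1
--
--     return flips
-- ===== SOURCE B (Python) =====
-- def required_flips(a, b, c):
--     m = 0xFFFFFFFF
--     na, nb, nc = a & m, b & m, c & m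
--     return (na & ~nc & m).bit_count() + (nb & ~nc & m).bit_count() + (nc & ~na & ~nb).bit_count()
-- ===== Notes on version B (the rewrite author's own statement) =====
-- stated objective: alternative
-- what changed: Replaces the 32-iteration per-bit loop with a closed form: three masked bitwise combinations (a&~c, b&~c, c&~a&~b over the low 32 bits) whose popcounts are summed.
import Mathlib
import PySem

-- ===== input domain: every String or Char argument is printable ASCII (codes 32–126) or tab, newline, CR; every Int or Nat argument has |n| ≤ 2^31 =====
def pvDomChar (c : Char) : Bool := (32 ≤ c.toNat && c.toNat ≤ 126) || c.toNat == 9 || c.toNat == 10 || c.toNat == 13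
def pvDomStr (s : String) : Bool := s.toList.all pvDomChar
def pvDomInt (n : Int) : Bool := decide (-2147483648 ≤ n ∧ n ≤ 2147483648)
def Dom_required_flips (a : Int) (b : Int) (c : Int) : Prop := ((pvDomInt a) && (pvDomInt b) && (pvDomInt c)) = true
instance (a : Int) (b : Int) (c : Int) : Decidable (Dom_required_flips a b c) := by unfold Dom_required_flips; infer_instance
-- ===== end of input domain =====

-- B replaces A's 32-iteration per-bit loop by a closed form: three 32-bit masked
-- bitwise combinations whose popcounts are summed (alternative decomposition, no loop).

-- ===== PORT A =====
-- Literal port of A's loop: for i in range(32), Python's 'a >> i' is 'a >>> i.toNat'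
-- (exact here since every i produced by pyRange 0 32 1 is nonnegative);
-- 'if bitA and bitB' is int truthiness: both bits nonzero.
def required_flips (a : Int) (b : Int) (c : Int) : Int :=
  (PySem.List.pyRange 0 32 1).foldl (fun (flips i : Int) =>
    let bitC := PySem.Int.band (c >>> i.toNat) 1
    let bitB := PySem.Int.band (b >>> i.toNat) 1
    let bitA := PySem.Int.band (a >>> i.toNat) 1
    if PySem.Int.bor bitA bitB ≠ bitC then
      if bitA ≠ 0 ∧ bitB ≠ 0 then flips + 2 else flips + 1
    else flips) 0

-- ===== PORT B =====
-- Literal port of Source B; Python's x.bit_count() is PySem.Int.bitCount, '~' is Int.not.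
def required_flips_alt (a : Int) (b : Int) (c : Int) : Int :=
  let m : Int := 0xFFFFFFFF
  let na := PySem.Int.band a m
  let nb := PySem.Int.band b m
  let nc := PySem.Int.band c m
  (PySem.Int.bitCount (PySem.Int.band (PySem.Int.band na (Int.not nc)) m) : Int)
  + (PySem.Int.bitCount (PySem.Int.band (PySem.Int.band nb (Int.not nc)) m) : Int)
  + (PySem.Int.bitCount (PySem.Int.band (PySem.Int.band nc (Int.not na)) (Int.not nb)) : Int)

-- ===== PRECONDITION & SPEC =====
def Spec_required_flips (a : Int) (b : Int) (c : Int) (out : Int) : Prop := out = required_flips_alt a b c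
instance (a : Int) (b : Int) (c : Int) (out : Int) : Decidable (Spec_required_flips a b c out) := by unfold Spec_required_flips; infer_instance

-- ===== CLAIM (what is proved, stated in full; the proofs are below) =====
def Claim_equal_required_flips : Prop := ∀ (a : Int) (b : Int) (c : Int), Dom_required_flips a b c → Spec_required_flips a b c (required_flips a b c)

-- ===== LEMMAS AND PROOFS =====

-- bit i of x, as an Int-valued indicator
def pvBit (x : Nat) (i : Nat) : Int := if x.testBit i then 1 else 0

-- low 32 bits of an Int, as a Nat
def pvLow (a : Int) : Nat := (a % 4294967296).toNat

theorem pvLow_lt (a : Int) : pvLow a < 4294967296 := by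
  unfold pvLow; omega

theorem pvLow_natCast (n : Nat) : pvLow (n : Int) = n % 2 ^ 32 := by
  unfold pvLow; omega

-- (m &&& n) + ldiff m n = m
theorem pv_and_add_ldiff (m : Nat) : ∀ n : Nat, (m &&& n) + m.ldiff n = m := by
  induction m using Nat.binaryRec with
  | zero =>
      intro n
      have h0 : (0 &&& n) = 0 := by simp
      have h1 : Nat.ldiff 0 n = 0 := by
        apply Nat.eq_of_testBit_eq; intro i; simp [Nat.testBit_ldiff]
      omega
  | bit b m ih =>
      intro n
      have hn := Nat.bit_testBit_zero_shiftRight_one n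
      rw [← hn, Nat.land_bit, Nat.ldiff_bit, Nat.bit_val, Nat.bit_val, Nat.bit_val]
      have := ih (n >>> 1)
      cases b <;> cases hb : n.testBit 0 <;> simp <;> omega

theorem pv_ldiff_le (m n : Nat) : m.ldiff n ≤ m := by
  have := pv_and_add_ldiff m n; omega

-- a & 0xFFFFFFFF = a mod 2^32
theorem pv_band_mask (a : Int) : PySem.Int.band a 4294967295 = ((pvLow a : Nat) : Int) := by
  have hm : (4294967295 : Nat) = 2 ^ 32 - 1 := by norm_num
  unfold pvLow
  unfold PySem.Int.band
  by_cases ha : 0 ≤ a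
  · rw [if_pos ha, if_pos (by norm_num)]
    have : a.toNat &&& (4294967295 : Int).toNat = a.toNat % 2 ^ 32 := by
      show a.toNat &&& 4294967295 = _
      rw [hm, Nat.and_two_pow_sub_one_eq_mod]
    rw [this]
    omega
  · rw [if_neg ha, if_pos (by norm_num)]
    have : (4294967295 : Int).toNat &&& (-a - 1).toNat = (-a - 1).toNat % 2 ^ 32 := by
      show 4294967295 &&& (-a - 1).toNat = _
      rw [Nat.land_comm, hm, Nat.and_two_pow_sub_one_eq_mod]
    rw [this]
    omega

-- x & ~y = ldiff x y   (x, y : Nat viewed as nonnegative Ints)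
theorem pv_band_not (x y : Nat) : PySem.Int.band (x : Int) (Int.not (y : Int)) = ((x.ldiff y : Nat) : Int) := by
  have hnot : Int.not (y : Int) = -(y : Int) - 1 := by
    simp [Int.not]; omega
  unfold PySem.Int.band
  rw [hnot, if_pos (by positivity), if_neg (by omega)]
  have h1 : (-(-(y : Int) - 1) - 1).toNat = y := by omega
  have h2 : ((x : Int)).toNat = x := by omega
  rw [h1, h2]
  have := pv_and_add_ldiff x y
  have hd : x - (x &&& y) = x.ldiff y := by omega
  rw [hd]

-- bit extraction: (a >> i) & 1 is bit i of the low 32 bits, for i < 32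
theorem pv_bit_extract (a : Int) (i : Nat) (h : i < 32) :
    PySem.Int.band (a >>> i) 1 = pvBit (pvLow a) i := by
  rw [PySem.Int.band_one]
  have hmod : PySem.Int.mod (a >>> i) 2 = (a >>> i) % 2 := by
    simp [PySem.Int.mod]
    rw [Int.fmod_eq_emod_of_nonneg _ (by norm_num)]
  rw [hmod, Int.shiftRight_eq_div_pow]
  have hpow : ((2 : Int) ^ (31 - i) * 2) * ((2 ^ i : Nat) : Int) = 4294967296 := by
    push_cast
    have h32 : (31 - i) + 1 + i = 32 := by omega
    calc ((2 : Int) ^ (31 - i) * 2) * 2 ^ i = 2 ^ ((31 - i) + 1 + i) := by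
          rw [pow_add, pow_add, pow_one]
      _ = 4294967296 := by rw [h32]; norm_num
  have hq := Int.ediv_add_emod a 4294967296
  have hr : a % 4294967296 = ((pvLow a : Nat) : Int) := by unfold pvLow; omega
  rw [hr] at hq
  have ha : a = ((pvLow a : Nat) : Int) + (2 ^ (31 - i) * (a / 4294967296) * 2) * ((2 ^ i : Nat) : Int) := by
    calc a = 4294967296 * (a / 4294967296) + ((pvLow a : Nat) : Int) := hq.symm
      _ = ((2 : Int) ^ (31 - i) * 2) * ((2 ^ i : Nat) : Int) * (a / 4294967296) + ((pvLow a : Nat) : Int) := by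
          rw [hpow]
      _ = ((pvLow a : Nat) : Int) + (2 ^ (31 - i) * (a / 4294967296) * 2) * ((2 ^ i : Nat) : Int) := by
          ring
  have hc : ((2 ^ i : Nat) : Int) ≠ 0 := by positivity
  conv_lhs => rw [ha]
  rw [Int.add_mul_ediv_right _ _ hc, ← Int.natCast_div]
  have htb := Nat.toNat_testBit (pvLow a) i
  generalize hv : pvLow a / 2 ^ i = v at htb ⊢
  unfold pvBit
  generalize hu : (2 : Int) ^ (31 - i) * (a / 4294967296) = u
  cases h' : (pvLow a).testBit i <;> rw [h'] at htb <;>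
    simp only [Bool.toNat_false, Bool.toNat_true] at htb <;>
    simp only [Bool.false_eq_true, if_false, if_true] <;> omega

-- popcount as a sum of bit indicators
theorem pv_bitCount_sum (w : Nat) : ∀ x : Nat, x < 2 ^ w →
    ((PySem.Int.bitCount (x : Int) : Nat) : Int) = ∑ i ∈ Finset.range w, pvBit x i := by
  induction w with
  | zero =>
      intro x hx
      interval_cases x
      simp [PySem.Int.bitCount_zero]
  | succ w ih =>
      intro x hx
      rcases Nat.eq_zero_or_pos x with h0 | hpos
      · subst h0
        simp [PySem.Int.bitCount_zero, pvBit, Nat.zero_testBit]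
      · rw [PySem.Int.bitCount_natCast hpos]
        have hdiv : x / 2 < 2 ^ w := by
          have : (2:Nat) ^ (w+1) = 2 ^ w * 2 := by ring
          omega
        have := ih (x / 2) hdiv
        rw [Finset.sum_range_succ']
        have hb : ∀ i, pvBit x (i + 1) = pvBit (x / 2) i := by
          intro i; unfold pvBit; rw [Nat.testBit_add_one]
        simp only [hb]
        have h0 : pvBit x 0 = ((x % 2 : Nat) : Int) := by
          unfold pvBit; rw [Nat.testBit_zero]
          rcases Nat.mod_two_eq_zero_or_one x with h | h <;> simp [h]
        rw [h0, ← this]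
        push_cast
        ring

-- the loop body of A, and its per-iteration cost
def pvBody (a b c : Int) (flips : Int) (i : Int) : Int :=
  let bitC := PySem.Int.band (c >>> i.toNat) 1
  let bitB := PySem.Int.band (b >>> i.toNat) 1
  let bitA := PySem.Int.band (a >>> i.toNat) 1
  if PySem.Int.bor bitA bitB ≠ bitC then
    if bitA ≠ 0 ∧ bitB ≠ 0 then flips + 2 else flips + 1
  else flips

def pvCost (a b c : Int) (i : Int) : Int :=
  let bitC := PySem.Int.band (c >>> i.toNat) 1
  let bitB := PySem.Int.band (b >>> i.toNat) 1
  let bitA := PySem.Int.band (a >>> i.toNat) 1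
  if PySem.Int.bor bitA bitB ≠ bitC then
    if bitA ≠ 0 ∧ bitB ≠ 0 then 2 else 1
  else 0

theorem pv_body_cost (a b c s i : Int) : pvBody a b c s i = s + pvCost a b c i := by
  simp only [pvBody, pvCost]
  split_ifs <;> ring

theorem pv_foldl (a b c : Int) : ∀ (l : List Int) (s : Int),
    l.foldl (pvBody a b c) s = s + (l.map (pvCost a b c)).sum := by
  intro l
  induction l with
  | nil => intro s; simp
  | cons x xs ih =>
      intro s
      simp only [List.foldl_cons, List.map_cons, List.sum_cons]
      rw [pv_body_cost, ih]
      ring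

theorem pv_range_eq : PySem.List.pyRange 0 32 1 = (List.range 32).map (fun n : Nat => (n : Int)) := by
  decide

-- the per-iteration cost, bit by bit
theorem pv_cost_eq (a b c : Int) (i : Nat) (h : i < 32) :
    pvCost a b c (i : Int) =
      (if (pvLow a).testBit i && !(pvLow c).testBit i then 1 else 0)
      + (if (pvLow b).testBit i && !(pvLow c).testBit i then 1 else 0)
      + (if ((pvLow c).testBit i && !(pvLow a).testBit i) && !(pvLow b).testBit i then 1 else 0) := by
  simp only [pvCost, Int.toNat_natCast]
  simp only [pv_bit_extract a i h, pv_bit_extract b i h, pv_bit_extract c i h]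
  unfold pvBit
  cases (pvLow a).testBit i <;> cases (pvLow b).testBit i <;> cases (pvLow c).testBit i <;> decide

-- A as a sum over the 32 bit positions
theorem pv_A (a b c : Int) : required_flips a b c =
    ∑ i ∈ Finset.range 32,
      ((if (pvLow a).testBit i && !(pvLow c).testBit i then (1 : Int) else 0)
      + (if (pvLow b).testBit i && !(pvLow c).testBit i then 1 else 0)
      + (if ((pvLow c).testBit i && !(pvLow a).testBit i) && !(pvLow b).testBit i then 1 else 0)) := by
  have h1 : required_flips a b c = (PySem.List.pyRange 0 32 1).foldl (pvBody a b c) 0 := by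
    unfold required_flips pvBody; rfl
  rw [h1, pv_range_eq, pv_foldl, List.map_map]
  have h2 : (((List.range 32).map (pvCost a b c ∘ fun n : Nat => (n : Int))).sum)
      = ∑ i ∈ Finset.range 32, pvCost a b c (i : Int) := rfl
  rw [h2, zero_add]
  exact Finset.sum_congr rfl fun i hi => pv_cost_eq a b c i (Finset.mem_range.mp hi)

-- B as the same sum, summand by summand
theorem pv_B (a b c : Int) : required_flips_alt a b c =
    (∑ i ∈ Finset.range 32, (if (pvLow a).testBit i && !(pvLow c).testBit i then (1 : Int) else 0))
    + (∑ i ∈ Finset.range 32, (if (pvLow b).testBit i && !(pvLow c).testBit i then (1 : Int) else 0))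
    + (∑ i ∈ Finset.range 32, (if ((pvLow c).testBit i && !(pvLow a).testBit i) && !(pvLow b).testBit i then (1 : Int) else 0)) := by
  unfold required_flips_alt
  simp only []
  rw [pv_band_mask a, pv_band_mask b, pv_band_mask c,
      pv_band_not (pvLow a) (pvLow c), pv_band_not (pvLow b) (pvLow c),
      pv_band_not (pvLow c) (pvLow a),
      pv_band_not ((pvLow c).ldiff (pvLow a)) (pvLow b),
      pv_band_mask ((((pvLow a).ldiff (pvLow c) : Nat)) : Int),
      pv_band_mask ((((pvLow b).ldiff (pvLow c) : Nat)) : Int),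
      pvLow_natCast, pvLow_natCast]
  have hb1 : (pvLow a).ldiff (pvLow c) % 2 ^ 32 < 2 ^ 32 := Nat.mod_lt _ (by norm_num)
  have hb2 : (pvLow b).ldiff (pvLow c) % 2 ^ 32 < 2 ^ 32 := Nat.mod_lt _ (by norm_num)
  have hb3 : ((pvLow c).ldiff (pvLow a)).ldiff (pvLow b) < 2 ^ 32 := by
    have t1 := pv_ldiff_le ((pvLow c).ldiff (pvLow a)) (pvLow b)
    have t2 := pv_ldiff_le (pvLow c) (pvLow a)
    have t3 := pvLow_lt c
    omega
  rw [pv_bitCount_sum 32 _ hb1, pv_bitCount_sum 32 _ hb2, pv_bitCount_sum 32 _ hb3]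
  congr 1
  · congr 1
    · exact Finset.sum_congr rfl fun i hi => by
        unfold pvBit
        simp only [Nat.testBit_mod_two_pow, Nat.testBit_ldiff]
        simp [Finset.mem_range.mp hi]
    · exact Finset.sum_congr rfl fun i hi => by
        unfold pvBit
        simp only [Nat.testBit_mod_two_pow, Nat.testBit_ldiff]
        simp [Finset.mem_range.mp hi]
  · exact Finset.sum_congr rfl fun i hi => by
      unfold pvBit
      simp [Nat.testBit_ldiff]

-- ===== VERDICT (by name: the statement is the Claim_ definition above) =====
theorem required_flips_spec : Claim_equal_required_flips := by
  intro a b c _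
  unfold Spec_required_flips
  rw [pv_A, pv_B, Finset.sum_add_distrib, Finset.sum_add_distrib]
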